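-- pv_equiv track=rewrite | github.com/hugohonda/dada-pt-br | src/dadaptbr/analyzer.py | _find_entity_in_translation
-- ===== SOURCE A (Python) =====
-- def _find_entity_in_translation(entity: str, entities_pt: list) -> tuple:
--     """Find entity in translation with fuzzy matching."""
--     entity_lower = entity.lower()
--
--     # Exact match
--     for ent_pt, type_pt in entities_pt:
--         if entity_lower == ent_pt.lower():
--             return (ent_pt, type_pt)
--
--     # Partial match (entity contained in translation entity or vice versa)
--     for ent_pt, type_pt in entities_pt:
--         if entity_lower in ent_pt.lower() or ent_pt.lower() in entity_lower:
--             return (ent_pt, type_pt)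
--
--     # Similar length and first character match (for transliterations)
--     for ent_pt, type_pt in entities_pt:
--         if len(entity) > 2 and len(ent_pt) > 2:
--             if entity[0].lower() == ent_pt[0].lower():
--                 if abs(len(entity) - len(ent_pt)) <= 2:
--                     return (ent_pt, type_pt)
--
--     return None
-- ===== SOURCE B (Python) =====
-- def _find_entity_in_translation(entity: str, entities_pt: list) -> tuple:
--     """Single pass: exact match returns immediately; first partial and first
--     similar candidates are remembered and chosen after the loop."""
--     entity_lower = entity.lower()
--     first_partial = None
--     first_similar = None
--     for ent_pt, type_pt in entities_pt:
--         ent_lower = ent_pt.lower()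
--         if entity_lower == ent_lower:
--             return (ent_pt, type_pt)
--         if first_partial is None and (entity_lower in ent_lower or ent_lower in entity_lower):
--             first_partial = (ent_pt, type_pt)
--         if (first_similar is None and len(entity) > 2 and len(ent_pt) > 2
--                 and entity[0].lower() == ent_pt[0].lower()
--                 and abs(len(entity) - len(ent_pt)) <= 2):
--             first_similar = (ent_pt, type_pt)
--     return first_partial if first_partial is not None else first_similar
-- ===== Notes on version B (the rewrite author's own statement) =====
-- stated objective: alternative
-- what changed: Replaced A's three sequential scans of the list (exact, then partial, then similar) by a single loop that returns an exact match immediately and remembers the first partial and first similar candidates, choosing between them after the loop.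
import Mathlib
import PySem

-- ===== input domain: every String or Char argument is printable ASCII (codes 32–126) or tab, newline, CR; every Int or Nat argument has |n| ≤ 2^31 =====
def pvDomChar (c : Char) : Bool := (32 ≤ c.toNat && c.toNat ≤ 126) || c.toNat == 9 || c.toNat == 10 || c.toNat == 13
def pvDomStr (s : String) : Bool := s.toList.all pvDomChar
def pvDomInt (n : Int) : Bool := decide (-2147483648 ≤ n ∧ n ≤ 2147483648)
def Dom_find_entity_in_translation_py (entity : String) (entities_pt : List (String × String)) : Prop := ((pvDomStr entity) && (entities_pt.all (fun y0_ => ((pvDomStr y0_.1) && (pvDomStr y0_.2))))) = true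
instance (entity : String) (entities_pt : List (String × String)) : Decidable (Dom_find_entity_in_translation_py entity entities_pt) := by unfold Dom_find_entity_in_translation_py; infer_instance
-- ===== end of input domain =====

-- B replaces A's three scans over the list by ONE pass that returns an exact
-- match immediately and remembers the first partial / first similar candidate
-- (objective: alternative decomposition; one traversal instead of up to three).

-- ===== PORT A =====
-- A scans the list three times: exact pass, partial pass, similar pass;
-- each `for` loop returning the first hit is the structural scan `List.find?`.
def find_entity_in_translation_py (entity : String) (entities_pt : List (String × String)) : Option (String × String) :=
  let entity_lower := PySem.Str.lower entity
  match entities_pt.find? (fun p => entity_lower == PySem.Str.lower p.1) with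
  | some p => some p
  | none =>
    match entities_pt.find? (fun p =>
        PySem.Str.isIn entity_lower (PySem.Str.lower p.1) ||
        PySem.Str.isIn (PySem.Str.lower p.1) entity_lower) with
    | some p => some p
    | none =>
      entities_pt.find? (fun p =>
        decide (2 < PySem.Str.len entity) && decide (2 < PySem.Str.len p.1) &&
        ((PySem.Str.pyGet? entity 0).map PySem.Chars.lowerChar ==
          (PySem.Str.pyGet? p.1 0).map PySem.Chars.lowerChar) &&
        decide ((PySem.Str.len entity - PySem.Str.len p.1).natAbs ≤ 2))

-- ===== PORT B =====
-- single pass with two "first seen" accumulators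
def feitLoop (entity entity_lower : String) :
    List (String × String) → Option (String × String) → Option (String × String) →
    Option (String × String)
  | [], first_partial, first_similar =>
    match first_partial with
    | some p => some p
    | none => first_similar
  | p :: rest, first_partial, first_similar =>
    let ent_lower := PySem.Str.lower p.1
    if entity_lower == ent_lower then some p
    else
      let first_partial' :=
        if first_partial.isNone &&
            (PySem.Str.isIn entity_lower ent_lower || PySem.Str.isIn ent_lower entity_lower)
        then some p else first_partial
      let first_similar' :=
        if first_similar.isNone &&
            decide (2 < PySem.Str.len entity) && decide (2 < PySem.Str.len p.1) &&
            ((PySem.Str.pyGet? entity 0).map PySem.Chars.lowerChar ==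
              (PySem.Str.pyGet? p.1 0).map PySem.Chars.lowerChar) &&
            decide ((PySem.Str.len entity - PySem.Str.len p.1).natAbs ≤ 2)
        then some p else first_similar
      feitLoop entity entity_lower rest first_partial' first_similar'

def find_entity_in_translation_py_alt (entity : String) (entities_pt : List (String × String)) : Option (String × String) :=
  feitLoop entity (PySem.Str.lower entity) entities_pt none none

-- ===== PRECONDITION & SPEC =====
def Spec_find_entity_in_translation_py (entity : String) (entities_pt : List (String × String)) (out : Option (String × String)) : Prop := out = find_entity_in_translation_py_alt entity entities_pt
instance (entity : String) (entities_pt : List (String × String)) (out : Option (String × String)) : Decidable (Spec_find_entity_in_translation_py entity entities_pt out) := by unfold Spec_find_entity_in_translation_py; infer_instance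

-- ===== CLAIM (what is proved, stated in full; the proofs are below) =====
def Claim_equal_find_entity_in_translation_py : Prop := ∀ (entity : String) (entities_pt : List (String × String)), Dom_find_entity_in_translation_py entity entities_pt → Spec_find_entity_in_translation_py entity entities_pt (find_entity_in_translation_py entity entities_pt)

-- ===== LEMMAS AND PROOFS =====

-- Loop invariant: feitLoop returns the first exact hit in the remaining list if
-- any, otherwise the accumulated-or-first partial hit, otherwise the
-- accumulated-or-first similar hit.
theorem feitLoop_eq (entity entity_lower : String) (l : List (String × String))
    (fp fs : Option (String × String)) :
    feitLoop entity entity_lower l fp fs =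
      match l.find? (fun p => entity_lower == PySem.Str.lower p.1) with
      | some p => some p
      | none =>
        match (match fp with
               | some q => some q
               | none => l.find? (fun p =>
                   PySem.Str.isIn entity_lower (PySem.Str.lower p.1) ||
                   PySem.Str.isIn (PySem.Str.lower p.1) entity_lower)) with
        | some p => some p
        | none =>
          match fs with
          | some q => some q
          | none => l.find? (fun p =>
              decide (2 < PySem.Str.len entity) && decide (2 < PySem.Str.len p.1) &&
              ((PySem.Str.pyGet? entity 0).map PySem.Chars.lowerChar ==
                (PySem.Str.pyGet? p.1 0).map PySem.Chars.lowerChar) &&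
              decide ((PySem.Str.len entity - PySem.Str.len p.1).natAbs ≤ 2)) := by
  induction l generalizing fp fs with
  | nil => cases fp <;> cases fs <;> simp [feitLoop]
  | cons hd tl ih =>
    simp only [feitLoop, List.find?]
    by_cases hx : (entity_lower == PySem.Str.lower hd.1) = true
    · simp [hx]
    · simp only [hx, Bool.false_eq_true, if_false]
      rw [ih]
      cases hcp : (PySem.Str.isIn entity_lower (PySem.Str.lower hd.1) ||
          PySem.Str.isIn (PySem.Str.lower hd.1) entity_lower) <;>
        cases hcs : (decide (2 < PySem.Str.len entity) && decide (2 < PySem.Str.len hd.1) &&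
            ((PySem.Str.pyGet? entity 0).map PySem.Chars.lowerChar ==
              (PySem.Str.pyGet? hd.1 0).map PySem.Chars.lowerChar) &&
            decide ((PySem.Str.len entity - PySem.Str.len hd.1).natAbs ≤ 2)) <;>
        cases fp <;> cases fs <;>
        simp_all
      split_ifs with h
      · have h2 := hcs h.1.1.1 h.1.1.2 h.1.2
        omega
      · simp

-- ===== VERDICT (by name: the statement is the Claim_ definition above) =====
theorem find_entity_in_translation_py_spec : Claim_equal_find_entity_in_translation_py := by
  intro entity entities_pt _
  unfold Spec_find_entity_in_translation_py find_entity_in_translation_py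
    find_entity_in_translation_py_alt
  rw [feitLoop_eq]
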